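-- pv_equiv track=rewrite | github.com/biancini/TeamsLogExporter | batch/download_findata.py | map_area
-- ===== SOURCE A (Python) =====
-- def map_area(row):
--     mapping_area = {
--         'Formazione Giovani': ['IeFP - Primi anni', 'IeFP - Secondi anni', 'IeFP - Terzi anni', 'IeFP - Quarti anni', 'IeFP - Apprendistato', 'Integrazione Sistema Scolastico', 'IeFP - Minori disabili', 'IeFP - Penale minorile', 'IeFP - Successo formativo'],
--         'Formazione Adulti Disoccupati': ['Formazione Permanente', 'Accompagnamento al lavoro', 'Orientamento', 'Tirocini extra-curricolari', 'Dote Formazione Lavoro', 'Qualifica adulti'],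
--         'Formazione Adulti Occupati': ['Formazione Continua', 'Formazione Abilitante', 'Apprendistato art.44 e art.45'],
--         'Svantaggio': ['Disabili', 'Detenuti ed ex-detenuti', 'Stranieri'],
--         'Altro e Varie': ['ITS e IFTS', 'Alta Formazione', 'Progetti Europei', 'Attività culturali e ricreative', 'Formazione personale interno']
--     }
--
--     for name, rules in mapping_area.items():
--         attivita = 'Undefined'
--         if row['attivita'] in rules:
--             return name
--
--     return 'Undefined'
-- ===== SOURCE B (Python) =====
-- # flat reverse index: activity -> area, written out once; lookup is a single dict .get
-- _AREA_BY_ACTIVITY = {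
--     'IeFP - Primi anni': 'Formazione Giovani',
--     'IeFP - Secondi anni': 'Formazione Giovani',
--     'IeFP - Terzi anni': 'Formazione Giovani',
--     'IeFP - Quarti anni': 'Formazione Giovani',
--     'IeFP - Apprendistato': 'Formazione Giovani',
--     'Integrazione Sistema Scolastico': 'Formazione Giovani',
--     'IeFP - Minori disabili': 'Formazione Giovani',
--     'IeFP - Penale minorile': 'Formazione Giovani',
--     'IeFP - Successo formativo': 'Formazione Giovani',
--     'Formazione Permanente': 'Formazione Adulti Disoccupati',
--     'Accompagnamento al lavoro': 'Formazione Adulti Disoccupati',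
--     'Orientamento': 'Formazione Adulti Disoccupati',
--     'Tirocini extra-curricolari': 'Formazione Adulti Disoccupati',
--     'Dote Formazione Lavoro': 'Formazione Adulti Disoccupati',
--     'Qualifica adulti': 'Formazione Adulti Disoccupati',
--     'Formazione Continua': 'Formazione Adulti Occupati',
--     'Formazione Abilitante': 'Formazione Adulti Occupati',
--     'Apprendistato art.44 e art.45': 'Formazione Adulti Occupati',
--     'Disabili': 'Svantaggio',
--     'Detenuti ed ex-detenuti': 'Svantaggio',
--     'Stranieri': 'Svantaggio',
--     'ITS e IFTS': 'Altro e Varie',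
--     'Alta Formazione': 'Altro e Varie',
--     'Progetti Europei': 'Altro e Varie',
--     'Attività culturali e ricreative': 'Altro e Varie',
--     'Formazione personale interno': 'Altro e Varie',
-- }
--
-- def map_area(row):
--     return _AREA_BY_ACTIVITY.get(row['attivita'], 'Undefined')
-- ===== Notes on version B (the rewrite author's own statement) =====
-- stated objective: simpler
-- what changed: Replaces the per-call loop over the five categories with inner list-membership scans by a flat reverse-lookup dict (activity -> area) written out once, so the call is a single dict .get with default 'Undefined'.
import Mathlib
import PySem

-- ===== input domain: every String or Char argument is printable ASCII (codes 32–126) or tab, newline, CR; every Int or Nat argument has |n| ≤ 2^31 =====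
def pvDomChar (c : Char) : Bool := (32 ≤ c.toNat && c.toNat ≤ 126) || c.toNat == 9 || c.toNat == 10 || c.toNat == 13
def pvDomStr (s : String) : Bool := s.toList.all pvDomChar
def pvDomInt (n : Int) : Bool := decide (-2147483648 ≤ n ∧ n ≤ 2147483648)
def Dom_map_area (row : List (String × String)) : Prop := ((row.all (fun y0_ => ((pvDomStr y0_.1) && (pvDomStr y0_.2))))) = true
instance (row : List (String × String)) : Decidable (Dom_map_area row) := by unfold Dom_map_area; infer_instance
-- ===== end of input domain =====

-- B replaces A's per-call loop over the five categories (with an inner list-membership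
-- scan each) by a flat reverse-lookup dict activity -> area built once, then a single .get.

-- ===== PORT A =====
def mappingArea : List (String × List String) :=
  [ ("Formazione Giovani", ["IeFP - Primi anni", "IeFP - Secondi anni", "IeFP - Terzi anni", "IeFP - Quarti anni", "IeFP - Apprendistato", "Integrazione Sistema Scolastico", "IeFP - Minori disabili", "IeFP - Penale minorile", "IeFP - Successo formativo"]),
    ("Formazione Adulti Disoccupati", ["Formazione Permanente", "Accompagnamento al lavoro", "Orientamento", "Tirocini extra-curricolari", "Dote Formazione Lavoro", "Qualifica adulti"]),
    ("Formazione Adulti Occupati", ["Formazione Continua", "Formazione Abilitante", "Apprendistato art.44 e art.45"]),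
    ("Svantaggio", ["Disabili", "Detenuti ed ex-detenuti", "Stranieri"]),
    ("Altro e Varie", ["ITS e IFTS", "Alta Formazione", "Progetti Europei", "Attività culturali e ricreative", "Formazione personale interno"]) ]

-- A's for-loop over mapping_area.items(): return name on the first rules list containing the activity
def mapAreaLoop (att : String) : List (String × List String) → String
  | [] => "Undefined"
  | (name, rules) :: rest => if rules.contains att then name else mapAreaLoop att rest

def map_area (row : List (String × String)) : String :=
  -- row['attivita']: first-match lookup in the association list; KeyError (none) is excluded by Pre_
  match row.find? (fun p => p.1 == "attivita") with
  | none => "Undefined"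
  | some p => mapAreaLoop p.2 mappingArea

-- ===== PORT B =====
-- the flat reverse dict activity -> area (a dict is an association list under the type convention)
def areaByActivity : List (String × String) :=
  [ ("IeFP - Primi anni", "Formazione Giovani"),
    ("IeFP - Secondi anni", "Formazione Giovani"),
    ("IeFP - Terzi anni", "Formazione Giovani"),
    ("IeFP - Quarti anni", "Formazione Giovani"),
    ("IeFP - Apprendistato", "Formazione Giovani"),
    ("Integrazione Sistema Scolastico", "Formazione Giovani"),
    ("IeFP - Minori disabili", "Formazione Giovani"),
    ("IeFP - Penale minorile", "Formazione Giovani"),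
    ("IeFP - Successo formativo", "Formazione Giovani"),
    ("Formazione Permanente", "Formazione Adulti Disoccupati"),
    ("Accompagnamento al lavoro", "Formazione Adulti Disoccupati"),
    ("Orientamento", "Formazione Adulti Disoccupati"),
    ("Tirocini extra-curricolari", "Formazione Adulti Disoccupati"),
    ("Dote Formazione Lavoro", "Formazione Adulti Disoccupati"),
    ("Qualifica adulti", "Formazione Adulti Disoccupati"),
    ("Formazione Continua", "Formazione Adulti Occupati"),
    ("Formazione Abilitante", "Formazione Adulti Occupati"),
    ("Apprendistato art.44 e art.45", "Formazione Adulti Occupati"),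
    ("Disabili", "Svantaggio"),
    ("Detenuti ed ex-detenuti", "Svantaggio"),
    ("Stranieri", "Svantaggio"),
    ("ITS e IFTS", "Altro e Varie"),
    ("Alta Formazione", "Altro e Varie"),
    ("Progetti Europei", "Altro e Varie"),
    ("Attività culturali e ricreative", "Altro e Varie"),
    ("Formazione personale interno", "Altro e Varie") ]

-- dict .get with default: first-match lookup in the association list
def getDefault (d : List (String × String)) (k dflt : String) : String :=
  match d.find? (fun q => q.1 == k) with
  | none => dflt
  | some q => q.2

def map_area_alt (row : List (String × String)) : String :=
  match row.find? (fun p => p.1 == "attivita") with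
  | none => "Undefined"
  | some p => getDefault areaByActivity p.2 "Undefined"

-- ===== PRECONDITION & SPEC =====
-- Pre_ excludes rows without the key 'attivita', on which the Python raises KeyError.
def Pre_map_area (row : List (String × String)) : Prop := "attivita" ∈ row.map Prod.fst
instance (row : List (String × String)) : Decidable (Pre_map_area row) := by unfold Pre_map_area; infer_instance
def pvWitness_map_area : (List (String × String)) := [("attivita", "Stranieri")]
def Spec_map_area (row : List (String × String)) (out : String) : Prop := out = map_area_alt row
instance (row : List (String × String)) (out : String) : Decidable (Spec_map_area row out) := by unfold Spec_map_area; infer_instance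

-- ===== CLAIM (what is proved, stated in full; the proofs are below) =====
def Claim_equal_map_area : Prop := ∀ (row : List (String × String)), Dom_map_area row → Pre_map_area row → Spec_map_area row (map_area row)

-- ===== LEMMAS AND PROOFS =====
theorem getDefault_map_append (s name : String) (rules : List String) (t : List (String × String)) :
    getDefault (rules.map (fun a => (a, name)) ++ t) s "Undefined"
      = if rules.contains s then name else getDefault t s "Undefined" := by
  induction rules with
  | nil => simp [getDefault]
  | cons a rs ih =>
      simp only [List.map_cons, List.cons_append, List.contains_cons]
      by_cases h : s = a
      · subst h
        simp [getDefault, List.find?_cons_of_pos]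
      · have hb : (a == s) = false := beq_eq_false_iff_ne.mpr (Ne.symm h)
        have hb' : (s == a) = false := beq_eq_false_iff_ne.mpr h
        have hstep : getDefault ((a, name) :: (rs.map (fun a => (a, name)) ++ t)) s "Undefined"
            = getDefault (rs.map (fun a => (a, name)) ++ t) s "Undefined" := by
          unfold getDefault
          rw [List.find?_cons_of_neg (by simp [hb])]
        rw [hstep, ih, hb']
        simp

theorem loop_eq_lookup_gen (s : String) (L : List (String × List String)) :
    mapAreaLoop s L = getDefault (L.flatMap (fun p => p.2.map (fun a => (a, p.1)))) s "Undefined" := by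
  induction L with
  | nil => simp [mapAreaLoop, getDefault]
  | cons p rest ih =>
      rw [List.flatMap_cons, getDefault_map_append]
      simp [mapAreaLoop, ih]

theorem loop_eq_lookup (s : String) :
    mapAreaLoop s mappingArea = getDefault areaByActivity s "Undefined" := by
  have h : areaByActivity = mappingArea.flatMap (fun p => p.2.map (fun a => (a, p.1))) := rfl
  rw [h]
  exact loop_eq_lookup_gen s mappingArea

-- ===== VERDICT (by name: the statement is the Claim_ definition above) =====
theorem map_area_spec : Claim_equal_map_area := by
  intro row _ hpre
  unfold Spec_map_area map_area map_area_alt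
  cases h : row.find? (fun p => p.1 == "attivita") with
  | none =>
      exfalso
      rw [List.find?_eq_none] at h
      obtain ⟨p, hp, hfst⟩ := List.mem_map.mp hpre
      exact h p hp (by simp [hfst])
  | some p => exact loop_eq_lookup p.2
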